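-- pv_equiv track=rewrite | github.com/biologyguy/RD-MCL | evolution_sim/tree_generator.py | generate_perfect_tree
-- ===== SOURCE A (Python) =====
-- import string
--
-- def generate_perfect_tree(num_taxa, groups):  # Generates a perfect bipartition tree
--     tree_str = "[&R] "
--     lefts = 0
--     for group in range(groups-1):
--         tree_str += "("
--         lefts += 1
--         for taxa in range(num_taxa-1):
--             tree_str += "({0}{1},".format(string.ascii_uppercase[taxa], group+1)
--             lefts += 1
--         tree_str += "{0}{1}".format(string.ascii_uppercase[num_taxa-1], group+1)
--         for x in range(num_taxa-1):
--             tree_str += ")"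
--             lefts -= 1
--         tree_str += ","
--
--     for taxa in range(num_taxa-1):
--         tree_str += "({0}{1},".format(string.ascii_uppercase[taxa], groups)
--         lefts += 1
--     tree_str += "{0}{1}".format(string.ascii_uppercase[num_taxa-1], groups)
--
--     while lefts > 0:
--         tree_str += ")"
--         lefts -= 1
--     tree_str += ";"
--     return tree_str
-- ===== SOURCE B (Python) =====
-- import string
--
--
-- def generate_perfect_tree(num_taxa, groups):
--     # Build each group's caterpillar subtree once, then nest the groups by a fold.
--     def cat(lbl):
--         inner = "".join("({0}{1},".format(string.ascii_uppercase[t], lbl)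
--                         for t in range(num_taxa - 1))
--         return (inner + string.ascii_uppercase[num_taxa - 1] + str(lbl)
--                 + ")" * (num_taxa - 1))
--
--     tree = cat(groups)
--     for lbl in reversed(range(1, groups)):
--         tree = "(" + cat(lbl) + "," + tree + ")"
--     return "[&R] " + tree + ";"
-- ===== Notes on version B (the rewrite author's own statement) =====
-- stated objective: simpler
-- what changed: Replaces A's single mutable string plus open-paren counter (with two duplicated label-emitting sections and a trailing while loop) by a per-group caterpillar builder called once per label and a right-nesting fold over the group labels.
import Mathlib
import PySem

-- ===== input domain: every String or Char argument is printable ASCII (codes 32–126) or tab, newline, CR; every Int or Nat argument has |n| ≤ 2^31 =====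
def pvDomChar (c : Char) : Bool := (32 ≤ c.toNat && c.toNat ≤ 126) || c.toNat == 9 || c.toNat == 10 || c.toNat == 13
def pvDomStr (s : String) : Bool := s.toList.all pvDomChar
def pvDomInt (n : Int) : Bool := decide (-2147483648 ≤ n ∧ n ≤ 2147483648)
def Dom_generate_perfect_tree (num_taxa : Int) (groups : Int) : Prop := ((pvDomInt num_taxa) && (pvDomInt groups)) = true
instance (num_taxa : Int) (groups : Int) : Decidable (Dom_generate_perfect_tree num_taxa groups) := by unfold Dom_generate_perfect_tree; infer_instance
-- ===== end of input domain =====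

-- B replaces A's string-and-counter accumulation by a per-group caterpillar builder and a
-- right-nesting fold over the group labels (objective: simpler; same exact output).

-- ===== PORT A =====

-- string.ascii_uppercase
def pyUpper : String := "ABCDEFGHIJKLMNOPQRSTUVWXYZ"

-- string.ascii_uppercase[i] rendered as a 1-char string; `none` (Python IndexError) is
-- excluded by Pre_, the "" branch is never reached there.
def upAt (i : Int) : String :=
  match PySem.Str.pyGet? pyUpper i with
  | some c => String.ofList [c]
  | none => ""

-- the trailing `while lefts > 0: tree_str += ")"` loop
def closeParens (s : String) (lefts : Int) : String :=
  if 0 < lefts then closeParens (s ++ ")") (lefts - 1) else s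
termination_by lefts.toNat
decreasing_by omega

def generate_perfect_tree (num_taxa : Int) (groups : Int) : String :=
  let st := (PySem.List.pyRange 0 (groups - 1) 1).foldl
    (fun (st : String × Int) group =>
      let st := (st.1 ++ "(", st.2 + 1)
      let st := (PySem.List.pyRange 0 (num_taxa - 1) 1).foldl
        (fun (st : String × Int) taxa =>
          (st.1 ++ "(" ++ upAt taxa ++ PySem.Int.toStr (group + 1) ++ ",", st.2 + 1)) st
      let st := (st.1 ++ upAt (num_taxa - 1) ++ PySem.Int.toStr (group + 1), st.2)
      let st := (PySem.List.pyRange 0 (num_taxa - 1) 1).foldl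
        (fun (st : String × Int) _ => (st.1 ++ ")", st.2 - 1)) st
      (st.1 ++ ",", st.2))
    ("[&R] ", (0 : Int))
  let st := (PySem.List.pyRange 0 (num_taxa - 1) 1).foldl
    (fun (st : String × Int) taxa =>
      (st.1 ++ "(" ++ upAt taxa ++ PySem.Int.toStr groups ++ ",", st.2 + 1)) st
  let s := st.1 ++ upAt (num_taxa - 1) ++ PySem.Int.toStr groups
  closeParens s st.2 ++ ";"

-- ===== PORT B =====

-- cat(lbl) from Source B: the caterpillar subtree of one group
def catAlt (num_taxa lbl : Int) : String :=
  let inner := String.join ((PySem.List.pyRange 0 (num_taxa - 1) 1).map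
    (fun t => "(" ++ upAt t ++ PySem.Int.toStr lbl ++ ","))
  inner ++ upAt (num_taxa - 1) ++ PySem.Int.toStr lbl
    ++ String.ofList (List.replicate (num_taxa - 1).toNat ')')

def generate_perfect_tree_alt (num_taxa : Int) (groups : Int) : String :=
  let tree := (PySem.List.pyRange 1 groups 1).reverse.foldl
    (fun acc lbl => "(" ++ catAlt num_taxa lbl ++ "," ++ acc ++ ")")
    (catAlt num_taxa groups)
  "[&R] " ++ tree ++ ";"

-- ===== PRECONDITION & SPEC =====
-- Python raises IndexError (ascii_uppercase[num_taxa-1], negative indices wrap down to -26)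
-- exactly when num_taxa < -25 or num_taxa > 26; Pre_ admits every input on which A returns.
def Pre_generate_perfect_tree (num_taxa : Int) (groups : Int) : Prop :=
  -25 ≤ num_taxa ∧ num_taxa ≤ 26
instance (num_taxa : Int) (groups : Int) : Decidable (Pre_generate_perfect_tree num_taxa groups) := by
  unfold Pre_generate_perfect_tree; infer_instance

def pvWitness_generate_perfect_tree : Int × Int := (3, 2)

def Spec_generate_perfect_tree (num_taxa : Int) (groups : Int) (out : String) : Prop := out = generate_perfect_tree_alt num_taxa groups
instance (num_taxa : Int) (groups : Int) (out : String) : Decidable (Spec_generate_perfect_tree num_taxa groups out) := by unfold Spec_generate_perfect_tree; infer_instance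

-- ===== CLAIM (what is proved, stated in full; the proofs are below) =====
def Claim_equal_generate_perfect_tree : Prop := ∀ (num_taxa : Int) (groups : Int), Dom_generate_perfect_tree num_taxa groups → Pre_generate_perfect_tree num_taxa groups → Spec_generate_perfect_tree num_taxa groups (generate_perfect_tree num_taxa groups)

-- ===== LEMMAS AND PROOFS =====

-- String.join peels off its head like a cons
lemma join_foldl_hoist (s : List String) (a : String) :
    List.foldl (fun r t => r ++ t) a s = a ++ List.foldl (fun r t => r ++ t) "" s := by
  induction s generalizing a with
  | nil => simp
  | cons x xs ih =>
    simp only [List.foldl_cons]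
    rw [ih (a ++ x), ih ("" ++ x), String.empty_append, String.append_assoc]

lemma join_cons (s : List String) (a : String) : String.join (a :: s) = a ++ String.join s := by
  simp only [String.join, List.foldl_cons, String.empty_append]
  exact join_foldl_hoist s a

-- the two “append one piece, bump the counter” inner loops of A
lemma foldl_piece (f : Int → String) (xs : List Int) (s : String) (lf : Int) :
    xs.foldl (fun (st : String × Int) t => (st.1 ++ f t, st.2 + 1)) (s, lf)
      = (s ++ String.join (xs.map f), lf + xs.length) := by
  induction xs generalizing s lf with
  | nil => simp [String.join]
  | cons x xs ih =>
    simp only [List.foldl_cons, List.map_cons, List.length_cons]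
    rw [ih, join_cons, ← String.append_assoc]
    refine Prod.ext rfl ?_
    push_cast; ring

-- A's per-group closing loop
lemma foldl_close (xs : List Int) (s : String) (lf : Int) :
    xs.foldl (fun (st : String × Int) _ => (st.1 ++ ")", st.2 - 1)) (s, lf)
      = (s ++ String.ofList (List.replicate xs.length ')'), lf - xs.length) := by
  induction xs generalizing s lf with
  | nil => simp
  | cons x xs ih =>
    simp only [List.foldl_cons, List.length_cons]
    rw [ih]
    refine Prod.ext ?_ ?_
    · show s ++ ")" ++ String.ofList (List.replicate xs.length ')') = _
      rw [String.append_assoc, show (")" : String) = String.ofList [')'] from rfl,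
        ← String.ofList_append]
      simp [List.replicate_succ]
    · show lf - 1 - (xs.length : Int) = lf - ((xs.length : Int) + 1)
      ring

-- A's trailing while-loop is `lefts.toNat` closing parens
lemma closeParens_eq (s : String) (l : Int) :
    closeParens s l = s ++ String.ofList (List.replicate l.toNat ')') := by
  generalize h : l.toNat = n
  induction n generalizing s l with
  | zero =>
    rw [closeParens, if_neg (by omega)]
    simp
  | succ n ih =>
    rw [closeParens, if_pos (by omega), ih (s ++ ")") (l - 1) (by omega)]
    rw [String.append_assoc, show (")" : String) = String.ofList [')'] from rfl,
      ← String.ofList_append]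
    simp [List.replicate_succ]

-- A's outer group loop, characterised via B's caterpillar builder
lemma outerA (n : Int) (xs : List Int) (s : String) (lf : Int) :
    xs.foldl
      (fun (st : String × Int) group =>
        let st := (st.1 ++ "(", st.2 + 1)
        let st := (PySem.List.pyRange 0 (n - 1) 1).foldl
          (fun (st : String × Int) taxa =>
            (st.1 ++ "(" ++ upAt taxa ++ PySem.Int.toStr (group + 1) ++ ",", st.2 + 1)) st
        let st := (st.1 ++ upAt (n - 1) ++ PySem.Int.toStr (group + 1), st.2)
        let st := (PySem.List.pyRange 0 (n - 1) 1).foldl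
          (fun (st : String × Int) _ => (st.1 ++ ")", st.2 - 1)) st
        (st.1 ++ ",", st.2)) (s, lf)
      = (s ++ String.join (xs.map (fun g => "(" ++ catAlt n (g + 1) ++ ",")), lf + xs.length) := by
  induction xs generalizing s lf with
  | nil => simp [String.join]
  | cons x xs ih =>
    simp only [List.foldl_cons, List.map_cons, List.length_cons]
    have hpiece := foldl_piece (fun t => "(" ++ upAt t ++ PySem.Int.toStr (x + 1) ++ ",")
      (PySem.List.pyRange 0 (n - 1) 1) (s ++ "(") (lf + 1)
    simp only [show (fun (st : String × Int) taxa =>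
        (st.1 ++ "(" ++ upAt taxa ++ PySem.Int.toStr (x + 1) ++ ",", st.2 + 1))
      = (fun (st : String × Int) taxa =>
        (st.1 ++ ("(" ++ upAt taxa ++ PySem.Int.toStr (x + 1) ++ ","), st.2 + 1)) from by
        funext st t; simp [String.append_assoc]]
    rw [hpiece, foldl_close, ih]
    have harith : lf + 1 + ((PySem.List.pyRange 0 (n - 1) 1).length : Int)
        - ((PySem.List.pyRange 0 (n - 1) 1).length : Int) + (xs.length : Int)
        = lf + ((xs.length : Int) + 1) := by ring
    refine Prod.ext ?_ (by exact_mod_cast harith)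
    show _ ++ String.join _ = _
    rw [join_cons, catAlt]
    simp only [PySem.List.length_pyRange_one, Int.sub_zero, String.append_assoc]

-- the relabelling bridge: A indexes groups 0..g-2 and adds 1, B walks labels 1..g-1
lemma map_shift (g : Int) (F : Int → String) :
    (PySem.List.pyRange 0 (g - 1) 1).map (fun k => F (k + 1))
      = (PySem.List.pyRange 1 g 1).map F := by
  rw [PySem.List.pyRange_one, PySem.List.pyRange_one]
  simp only [List.map_map, Int.sub_zero]
  apply List.map_congr_left
  intro k _
  simp [Function.comp, Int.add_comm]

-- A in normal form
lemma A_char (n g : Int) :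
    generate_perfect_tree n g
      = "[&R] " ++ String.join ((PySem.List.pyRange 1 g 1).map (fun l => "(" ++ catAlt n l ++ ","))
        ++ catAlt n g ++ String.ofList (List.replicate (g - 1).toNat ')') ++ ";" := by
  rw [generate_perfect_tree]
  simp only [outerA]
  have hpiece := foldl_piece (fun t => "(" ++ upAt t ++ PySem.Int.toStr g ++ ",")
    (PySem.List.pyRange 0 (n - 1) 1)
  simp only [show (fun (st : String × Int) taxa =>
      (st.1 ++ "(" ++ upAt taxa ++ PySem.Int.toStr g ++ ",", st.2 + 1))
    = (fun (st : String × Int) taxa =>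
      (st.1 ++ ("(" ++ upAt taxa ++ PySem.Int.toStr g ++ ","), st.2 + 1)) from by
      funext st t; simp [String.append_assoc]]
  rw [hpiece, closeParens_eq]
  simp only [PySem.List.length_pyRange_one, Int.sub_zero]
  have htoNat : ((0 : Int) + ((g - 1).toNat : Int) + ((n - 1).toNat : Int)).toNat
      = (n - 1).toNat + (g - 1).toNat := by omega
  rw [htoNat, List.replicate_add, String.ofList_append, map_shift g (fun l => "(" ++ catAlt n l ++ ",")]
  rw [catAlt]
  simp [String.append_assoc]

-- B's right-nesting fold, unrolled
lemma revfold (n : Int) (L : List Int) (acc : String) :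
    L.reverse.foldl (fun acc lbl => "(" ++ catAlt n lbl ++ "," ++ acc ++ ")") acc
      = String.join (L.map (fun l => "(" ++ catAlt n l ++ ","))
        ++ acc ++ String.ofList (List.replicate L.length ')') := by
  induction L generalizing acc with
  | nil => simp [String.join]
  | cons x xs ih =>
    simp only [List.reverse_cons, List.foldl_append, List.foldl_cons, List.foldl_nil,
      List.map_cons, List.length_cons, ih]
    rw [join_cons, show (")" : String) = String.ofList [')'] from rfl,
      List.replicate_succ', String.ofList_append]
    simp only [String.append_assoc]

-- B in the same normal form
lemma B_char (n g : Int) :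
    generate_perfect_tree_alt n g
      = "[&R] " ++ String.join ((PySem.List.pyRange 1 g 1).map (fun l => "(" ++ catAlt n l ++ ","))
        ++ catAlt n g ++ String.ofList (List.replicate (g - 1).toNat ')') ++ ";" := by
  rw [generate_perfect_tree_alt]
  simp only [revfold, PySem.List.length_pyRange_one]
  simp [String.append_assoc]

-- ===== VERDICT (by name: the statement is the Claim_ definition above) =====
theorem generate_perfect_tree_spec : Claim_equal_generate_perfect_tree := by
  intro num_taxa groups _ _
  show generate_perfect_tree num_taxa groups = generate_perfect_tree_alt num_taxa groups
  rw [A_char, B_char]
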